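-- pv_equiv track=rewrite | github.com/skku-algostudy/algostudy-python | week2/준우/PG#64064 - 불량 사용자/solution.py | solution
-- ===== SOURCE A (Python) =====
-- def solution(user_id, banned_id):
--     answer = 1
--     for banid in banned_id:
--         available = {}
--         n = len(banid)
--         for userid in user_id:
--             if n == len(userid):
--                 available[userid] = True
--         for i in range(n):
--             if banid[i] == '*':
--                 continue
--             for each in available:
--                 if banid[i] != each[i]:
--                     available[each] = False
--         temp = 0
--         for each in available:
--             if available[each]:
--                 temp += 1
--         answer *= temp
--     return answer
-- ===== SOURCE B (Python) =====
-- def solution(user_id, banned_id):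
--     buckets = {}
--     for u in dict.fromkeys(user_id):
--         buckets.setdefault(len(u), []).append(u)
--     answer = 1
--     for banid in banned_id:
--         answer *= sum(1 for u in buckets.get(len(banid), [])
--                       if all(b == '*' or b == c for b, c in zip(banid, u)))
--     return answer
-- ===== Notes on version B (the rewrite author's own statement) =====
-- stated objective: simpler
-- what changed: A rebuilds a mutable flag dict per pattern and eliminates candidates position by position over three passes; B builds a length-indexed bucket table over the distinct user ids once and multiplies in a single full-match count per pattern.
import Mathlib
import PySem

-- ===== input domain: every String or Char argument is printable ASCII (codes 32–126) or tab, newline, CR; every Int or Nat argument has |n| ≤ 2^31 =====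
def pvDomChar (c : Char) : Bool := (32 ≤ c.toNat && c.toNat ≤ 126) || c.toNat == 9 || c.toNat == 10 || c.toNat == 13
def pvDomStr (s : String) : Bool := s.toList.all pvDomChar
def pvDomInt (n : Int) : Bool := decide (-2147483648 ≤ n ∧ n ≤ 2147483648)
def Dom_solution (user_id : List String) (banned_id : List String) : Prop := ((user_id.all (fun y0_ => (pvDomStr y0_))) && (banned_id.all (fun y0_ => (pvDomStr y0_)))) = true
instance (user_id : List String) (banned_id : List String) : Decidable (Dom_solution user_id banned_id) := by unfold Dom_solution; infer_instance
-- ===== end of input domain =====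

-- B replaces A's per-position elimination over a mutable flag dict by a length-indexed
-- bucket table over the distinct user ids with a single full-match count per pattern (objective: simpler).

-- ===== PORT A =====
def solution (user_id : List String) (banned_id : List String) : Int :=
  banned_id.foldl (fun answer banid =>
    let n : Int := PySem.Str.len banid
    let available : PySem.Dict String Bool :=
      user_id.foldl (fun d userid =>
        if n = PySem.Str.len userid then d.insert userid true else d) PySem.Dict.empty
    let available :=
      (PySem.List.pyRange 0 n 1).foldl (fun d i =>
        if PySem.List.pyGetD banid.toList i ' ' = '*' then d
        else d.keys.foldl (fun d' each =>
          if PySem.List.pyGetD banid.toList i ' ' ≠ PySem.List.pyGetD each.toList i ' '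
          then d'.insert each false else d') d) available
    let temp : Int :=
      available.keys.foldl (fun t each =>
        if available.getD each false then t + 1 else t) 0
    answer * temp) 1

-- ===== PORT B =====
def solution_alt (user_id : List String) (banned_id : List String) : Int :=
  let buckets : PySem.Dict Int (List String) :=
    (PySem.List.dedup user_id).foldl (fun b u =>
      b.modify (PySem.Str.len u) [] (fun l => l ++ [u])) PySem.Dict.empty
  banned_id.foldl (fun answer banid =>
    answer * (((buckets.getD (PySem.Str.len banid) []).countP (fun u =>
      (banid.toList.zip u.toList).all (fun p => p.1 == '*' || p.1 == p.2)) : Int))) 1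

-- ===== PRECONDITION & SPEC =====
def Spec_solution (user_id : List String) (banned_id : List String) (out : Int) : Prop := out = solution_alt user_id banned_id
instance (user_id : List String) (banned_id : List String) (out : Int) : Decidable (Spec_solution user_id banned_id out) := by unfold Spec_solution; infer_instance

-- ===== CLAIM (what is proved, stated in full; the proofs are below) =====
def Claim_equal_solution : Prop := ∀ (user_id : List String) (banned_id : List String), Dom_solution user_id banned_id → Spec_solution user_id banned_id (solution user_id banned_id)

-- ===== LEMMAS AND PROOFS =====

def pvVal (bl : List Char) (m : Nat) (u : String) : Bool :=
  decide (∀ j : Nat, j < m → (PySem.List.pyGetD bl (j : Int) ' ' = '*' ∨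
    PySem.List.pyGetD bl (j : Int) ' ' = PySem.List.pyGetD u.toList (j : Int) ' '))


lemma pv_insert_true (S : List String) (x : String) :
    PySem.Dict.insert ⟨S.map (fun u => (u, true))⟩ x true
      = PySem.Dict.mk ((PySem.Set.add S x).map (fun u => (u, true))) := by
  by_cases hx : x ∈ S
  · rw [PySem.Set.add_of_mem hx]
    unfold PySem.Dict.insert PySem.Dict.contains
    have hc : (List.map (fun u => (u, true)) S).any (fun p => p.1 == x) = true := by
      simp [List.any_map, Function.comp]; exact hx
    simp only [hc, if_true]
    congr 1
    rw [List.map_map]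
    apply List.map_congr_left
    intro u hu
    by_cases h : u = x <;> simp [h]
  · rw [PySem.Set.add_of_not_mem hx]
    unfold PySem.Dict.insert PySem.Dict.contains
    have hc : (List.map (fun u => (u, true)) S).any (fun p => p.1 == x) = false := by
      simp [List.any_map, Function.comp]; intro u hu h; subst h; exact hx hu
    simp only [hc, Bool.false_eq_true, if_false]
    simp

lemma pv_stage0 (xs : List String) (S : List String) (n : Int) :
    xs.foldl (fun d u => if n = PySem.Str.len u then d.insert u true else d)
        (PySem.Dict.mk (S.map (fun u => (u, true))))
      = PySem.Dict.mk ((PySem.Set.update S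
          (xs.filter (fun u => decide (n = PySem.Str.len u)))).map (fun u => (u, true))) := by
  induction xs generalizing S with
  | nil => simp [PySem.Set.update]
  | cons x xs ih =>
    by_cases h : n = PySem.Str.len x
    · have hd : (decide (n = PySem.Str.len x)) = true := decide_eq_true h
      simp only [List.foldl_cons, List.filter_cons, hd, if_pos h, if_true, PySem.Set.update_cons]
      rw [pv_insert_true]
      exact ih (PySem.Set.add S x)
    · have hd : (decide (n = PySem.Str.len x)) = false := decide_eq_false h
      simp only [List.foldl_cons, List.filter_cons, hd, if_neg h, Bool.false_eq_true, if_false]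
      exact ih S

lemma pv_insert_false (K : List String) (g : String → Bool) (y : String) (hy : y ∈ K) :
    PySem.Dict.insert ⟨K.map (fun u => (u, g u))⟩ y false
      = PySem.Dict.mk (K.map (fun u => (u, if u = y then false else g u))) := by
  unfold PySem.Dict.insert PySem.Dict.contains
  have hc : (List.map (fun u => (u, g u)) K).any (fun p => p.1 == y) = true := by
    simp [List.any_map, Function.comp]; exact hy
  simp only [hc, if_true]
  congr 1
  rw [List.map_map]
  apply List.map_congr_left
  intro u hu
  by_cases h : u = y <;> simp [h]

lemma pv_inner (c : String → Prop) [DecidablePred c] (K : List String) (ys : List String)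
    (hys : ∀ y ∈ ys, y ∈ K) (g : String → Bool) :
    ys.foldl (fun d' each => if c each then d'.insert each false else d')
        (PySem.Dict.mk (K.map (fun u => (u, g u))))
      = PySem.Dict.mk (K.map (fun u => (u, if c u ∧ u ∈ ys then false else g u))) := by
  induction ys generalizing g with
  | nil =>
    simp only [List.foldl_nil]
    congr 1
    apply List.map_congr_left
    intro u hu
    simp
  | cons y ys ih =>
    have hyK : y ∈ K := hys y (List.mem_cons_self)
    have hys' : ∀ z ∈ ys, z ∈ K := fun z hz => hys z (List.mem_cons_of_mem _ hz)
    by_cases h : c y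
    · simp only [List.foldl_cons, if_pos h]
      rw [pv_insert_false K g y hyK, ih hys' (fun u => if u = y then false else g u)]
      congr 1
      apply List.map_congr_left
      intro u hu
      simp only [List.mem_cons]
      by_cases huy : u = y
      · subst huy
        simp [h]
      · simp only [huy, if_false]
        congr 1
        simp
    · simp only [List.foldl_cons, if_neg h]
      rw [ih hys' g]
      congr 1
      apply List.map_congr_left
      intro u hu
      simp only [List.mem_cons]
      have hiff : (c u ∧ (u = y ∨ u ∈ ys)) ↔ (c u ∧ u ∈ ys) := by
        constructor
        · rintro ⟨hc1, hy' | hy'⟩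
          · exact absurd (hy' ▸ hc1) h
          · exact ⟨hc1, hy'⟩
        · rintro ⟨hc1, hy'⟩; exact ⟨hc1, Or.inr hy'⟩
      congr 1
      simp [hiff]

lemma pvVal_succ (bl : List Char) (m : Nat) (u : String) :
    pvVal bl (m + 1) u
      = (pvVal bl m u &&
          (decide (PySem.List.pyGetD bl (m : Int) ' ' = '*') ||
           decide (PySem.List.pyGetD bl (m : Int) ' ' = PySem.List.pyGetD u.toList (m : Int) ' '))) := by
  simp only [pvVal]
  rw [Bool.eq_iff_iff]
  simp only [Bool.and_eq_true, Bool.or_eq_true, decide_eq_true_eq]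
  constructor
  · intro hall
    exact ⟨fun j hj => hall j (Nat.lt_succ_of_lt hj), hall m (Nat.lt_succ_self m)⟩
  · rintro ⟨hall, hm⟩ j hj
    rcases Nat.lt_succ_iff_lt_or_eq.mp hj with hj' | rfl
    · exact hall j hj'
    · exact hm

lemma pv_keys (K : List String) (g : String → Bool) :
    PySem.Dict.keys ⟨K.map (fun u => (u, g u))⟩ = K := by
  unfold PySem.Dict.keys
  rw [List.map_map]
  exact List.map_id _

lemma pvVal_zero (bl : List Char) (u : String) : pvVal bl 0 u = true := by simp [pvVal]

lemma pv_outer (bl : List Char) (K : List String) (m : Nat) :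
    (PySem.List.pyRange 0 (m : Int) 1).foldl (fun d i =>
        if PySem.List.pyGetD bl i ' ' = '*' then d
        else d.keys.foldl (fun d' each =>
          if PySem.List.pyGetD bl i ' ' ≠ PySem.List.pyGetD each.toList i ' '
          then d'.insert each false else d') d)
        (PySem.Dict.mk (K.map (fun u => (u, true))))
      = PySem.Dict.mk (K.map (fun u => (u, pvVal bl m u))) := by
  induction m with
  | zero =>
    rw [PySem.List.pyRange_one_eq_nil (by norm_num)]
    have h0 : ∀ u, pvVal bl 0 u = true := pvVal_zero bl
    simp [h0]
  | succ m ih =>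
    have hcast : ((m + 1 : Nat) : Int) = (m : Int) + 1 := by push_cast; ring
    rw [hcast, PySem.List.pyRange_one_succ_right (by positivity), List.foldl_append, ih]
    simp only [List.foldl_cons, List.foldl_nil]
    by_cases hstar : PySem.List.pyGetD bl (m : Int) ' ' = '*'
    · rw [if_pos hstar]
      congr 1
      apply List.map_congr_left
      intro u hu
      rw [pvVal_succ]
      simp [hstar]
    · rw [if_neg hstar, pv_keys,
        pv_inner (fun each => PySem.List.pyGetD bl (m : Int) ' ' ≠ PySem.List.pyGetD each.toList (m : Int) ' ')
          K K (fun y hy => hy) (pvVal bl m)]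
      congr 1
      apply List.map_congr_left
      intro u hu
      rw [pvVal_succ]
      by_cases hne : PySem.List.pyGetD bl (m : Int) ' ' = PySem.List.pyGetD u.toList (m : Int) ' '
      · rw [if_neg (fun hh => hh.1 hne), decide_eq_true hne]
        simp
      · rw [if_pos ⟨hne, hu⟩, decide_eq_false hne, decide_eq_false hstar]
        simp

lemma pv_getD_map (K : List String) (g : String → Bool) (u : String) (hu : u ∈ K) :
    PySem.Dict.getD ⟨K.map (fun v => (v, g v))⟩ u false = g u := by
  unfold PySem.Dict.getD PySem.Dict.get?
  induction K with
  | nil => cases hu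
  | cons x K ih =>
    rcases List.mem_cons.mp hu with rfl | hu'
    · simp
    · by_cases hx : x = u
      · subst hx; simp
      · simp only [List.map_cons, List.find?_cons]
        have : ((x, g x).1 == u) = false := by simp [hx]
        rw [this]
        exact ih hu'

lemma pv_count (K : List String) (g : String → Bool) (t0 : Int)
    (f : String → Bool) (hf : ∀ u ∈ K, f u = g u) :
    K.foldl (fun t each => if f each then t + 1 else t) t0 = t0 + (K.countP g : Int) := by
  induction K generalizing t0 with
  | nil => simp
  | cons x K ih =>
    have hfg := hf x (List.mem_cons_self)
    have hf' : ∀ u ∈ K, f u = g u := fun u hu => hf u (List.mem_cons_of_mem _ hu)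
    simp only [List.foldl_cons, List.countP_cons, hfg]
    by_cases hx : g x = true
    · rw [if_pos hx, ih (t0+1) hf']
      simp [hx]; ring
    · rw [if_neg (by simp [hx]), ih t0 hf']
      simp [hx]

lemma pv_buckets (ds : List String) (d : PySem.Dict Int (List String)) (k : Int) :
    PySem.Dict.getD (ds.foldl (fun b u =>
        b.modify (PySem.Str.len u) [] (fun l => l ++ [u])) d) k []
      = d.getD k [] ++ ds.filter (fun u => decide (PySem.Str.len u = k)) := by
  induction ds generalizing d with
  | nil => simp
  | cons u ds ih =>
    simp only [List.foldl_cons, List.filter_cons]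
    rw [ih]
    unfold PySem.Dict.modify
    by_cases h : PySem.Str.len u = k
    · rw [decide_eq_true h, if_pos rfl]
      unfold PySem.Dict.getD
      rw [h, PySem.Dict.get?_insert_self]
      simp
    · rw [decide_eq_false h]
      unfold PySem.Dict.getD
      rw [PySem.Dict.get?_insert_of_ne _ _ (fun hh => h hh.symm)]
      simp

lemma pv_dedup_filter (p : String → Bool) (xs : List String) :
    PySem.List.dedup (xs.filter p) = (PySem.List.dedup xs).filter p := by
  simp only [PySem.List.dedup_eq_ofList]
  induction xs using List.reverseRecOn with
  | nil => simp [PySem.Set.ofList]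
  | append_singleton xs x ih =>
    rw [List.filter_append, PySem.Set.ofList_append_singleton]
    by_cases hp : p x = true
    · simp only [List.filter_cons, hp, if_pos, List.filter_nil]
      rw [PySem.Set.ofList_append_singleton]
      by_cases hx : x ∈ xs
      · rw [PySem.Set.add_of_mem (by rw [PySem.Set.mem_ofList]; exact List.mem_filter.mpr ⟨hx, hp⟩),
          PySem.Set.add_of_mem (by rw [PySem.Set.mem_ofList]; exact hx), ih]
      · rw [PySem.Set.add_of_not_mem (by rw [PySem.Set.mem_ofList]; exact fun hh => hx (List.mem_filter.mp hh).1),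
          PySem.Set.add_of_not_mem (by rw [PySem.Set.mem_ofList]; exact hx),
          List.filter_append, ih]
        simp [hp]
    · have : List.filter p [x] = [] := by simp [hp]
      rw [this, List.append_nil, ih]
      by_cases hx : x ∈ xs
      · rw [PySem.Set.add_of_mem (by rw [PySem.Set.mem_ofList]; exact hx)]
      · rw [PySem.Set.add_of_not_mem (by rw [PySem.Set.mem_ofList]; exact hx),
          List.filter_append]
        simp [hp]

lemma pv_zip_all (bl : List Char) (u : String) (h : u.toList.length = bl.length) :
    ((bl.zip u.toList).all (fun p => p.1 == '*' || p.1 == p.2))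
      = decide (∀ j : Nat, j < bl.length → (PySem.List.pyGetD bl (j : Int) ' ' = '*' ∨
          PySem.List.pyGetD bl (j : Int) ' ' = PySem.List.pyGetD u.toList (j : Int) ' ')) := by
  rw [Bool.eq_iff_iff]
  simp only [List.all_eq_true, decide_eq_true_eq]
  constructor
  · intro hall j hj
    have hj2 : j < (bl.zip u.toList).length := by simp [List.length_zip, h, hj]
    have := hall _ (List.mem_iff_getElem.mpr ⟨j, hj2, rfl⟩)
    rw [List.getElem_zip] at this
    simp only [beq_iff_eq, Bool.or_eq_true] at this
    rw [PySem.List.pyGetD_natCast, PySem.List.pyGetD_natCast,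
      List.getD_eq_getElem _ _ hj, List.getD_eq_getElem _ _ (by omega)]
    exact this
  · intro hall pr hpr
    rcases List.mem_iff_getElem.mp hpr with ⟨j, hj2, rfl⟩
    have hj : j < bl.length := by simp [List.length_zip] at hj2; omega
    have := hall j hj
    rw [PySem.List.pyGetD_natCast, PySem.List.pyGetD_natCast,
      List.getD_eq_getElem _ _ hj, List.getD_eq_getElem _ _ (by omega)] at this
    rw [List.getElem_zip]
    simp only [beq_iff_eq, Bool.or_eq_true]
    exact this

-- ===== VERDICT (by name: the statement is the Claim_ definition above) =====
theorem solution_spec : Claim_equal_solution := by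
  intro user_id banned_id _
  unfold Spec_solution solution solution_alt
  apply PySem.List.foldl_congr_mem
  intro acc banid _
  dsimp only
  congr 1
  have e0 : (PySem.Dict.empty : PySem.Dict String Bool)
      = ⟨([] : List String).map (fun u => (u, true))⟩ := rfl
  rw [e0, pv_stage0, PySem.Set.update_nil_left]
  have hlen : PySem.Str.len banid = ((banid.toList.length : Nat) : Int) := rfl
  rw [hlen, pv_outer banid.toList _ banid.toList.length]
  rw [pv_keys, pv_count _ (pvVal banid.toList banid.toList.length) 0 _
    (fun u hu => pv_getD_map _ _ u hu), zero_add]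
  rw [pv_buckets]
  have he : (PySem.Dict.empty : PySem.Dict Int (List String)).getD (↑banid.toList.length) [] = [] := rfl
  rw [he, List.nil_append, ← PySem.List.dedup_eq_ofList, pv_dedup_filter,
    List.filter_congr (fun u (_ : u ∈ PySem.List.dedup user_id) =>
      decide_eq_decide.mpr (eq_comm : ((banid.toList.length : Int) = PySem.Str.len u) ↔ _))]
  congr 1
  apply List.countP_congr
  intro u hu
  have hlu : u.toList.length = banid.toList.length := by
    have := (List.mem_filter.mp hu).2
    simp only [decide_eq_true_eq, PySem.Str.len] at this
    exact_mod_cast this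
  unfold pvVal
  rw [(pv_zip_all banid.toList u hlu).symm]
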